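-- pv_equiv track=rewrite | github.com/Angelina-Hart/Scripting-Fundamentals | Module 6/space_explorer.py | display_galaxy
-- ===== SOURCE A (Python) =====
-- MAP_SIZE = 100
--
-- def display_galaxy(galaxy_map):
--     counter = 0
--     concatenated_objects_str = ""
--     for value in galaxy_map.values():
--         concatenated_objects_str += str(value)
--         counter += 1
--         if (counter/MAP_SIZE) >= 1 and (counter % MAP_SIZE) == 0:
--             concatenated_objects_str += "\n"
--     return concatenated_objects_str
--     pass
-- ===== SOURCE B (Python) =====
-- MAP_SIZE = 100
--
-- def display_galaxy(galaxy_map):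
--     vs = list(galaxy_map.values())
--     out = ""
--     while vs:
--         head, vs = vs[:MAP_SIZE], vs[MAP_SIZE:]
--         out += ''.join(str(v) for v in head)
--         if len(head) == MAP_SIZE:
--             out += "\n"
--     return out
-- ===== Notes on version B (the rewrite author's own statement) =====
-- stated objective: alternative
-- what changed: Replaced the per-element running-counter scan with its float-division-and-modulo newline test by slicing the values into MAP_SIZE-sized chunks and appending a newline exactly when a chunk is full.
import Mathlib
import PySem

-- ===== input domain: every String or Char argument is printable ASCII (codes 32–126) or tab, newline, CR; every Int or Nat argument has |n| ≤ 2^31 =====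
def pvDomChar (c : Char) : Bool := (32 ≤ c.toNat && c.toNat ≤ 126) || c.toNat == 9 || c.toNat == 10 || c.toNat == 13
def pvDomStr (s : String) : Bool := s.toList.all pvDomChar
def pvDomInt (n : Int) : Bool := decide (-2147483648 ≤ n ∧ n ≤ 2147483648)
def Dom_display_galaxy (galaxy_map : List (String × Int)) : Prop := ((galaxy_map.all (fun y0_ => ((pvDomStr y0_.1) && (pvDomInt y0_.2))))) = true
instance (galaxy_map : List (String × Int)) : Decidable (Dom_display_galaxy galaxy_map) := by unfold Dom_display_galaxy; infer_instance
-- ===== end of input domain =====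

-- B replaces A's per-element running-counter/modulo scan by slicing the values into
-- MAP_SIZE-chunks and appending "\n" exactly when a chunk is full (objective: alternative).


-- ===== PORT A =====
def MAP_SIZE : Int := 100

-- the for-loop of A over the dict's values, with state (counter, concatenated_objects_str);
-- Python's '(counter/MAP_SIZE) >= 1' is float true division: for integers and MAP_SIZE = 100 > 0
-- it holds exactly when MAP_SIZE ≤ counter, which is how it is written here.
def pvLoopA : List Int → Int → String → String
  | [], _, acc => acc
  | value :: rest, counter, acc =>
      let acc' := acc ++ PySem.Int.toStr value
      let c' := counter + 1
      if MAP_SIZE ≤ c' ∧ PySem.Int.mod c' MAP_SIZE = 0 then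
        pvLoopA rest c' (acc' ++ "\n")
      else
        pvLoopA rest c' acc'

def display_galaxy (galaxy_map : List (String × Int)) : String :=
  pvLoopA (PySem.Dict.ofList galaxy_map).values 0 ""

-- ===== PORT B =====
-- ''.join(str(v) for v in head)
def pvJoinStrs : List Int → String
  | [] => ""
  | v :: rest => PySem.Int.toStr v ++ pvJoinStrs rest

-- the while-loop of B: peel off vs[:MAP_SIZE] / vs[MAP_SIZE:], newline iff the chunk is full
def pvRenderChunks (vs : List Int) (out : String) : String :=
  if vs.isEmpty then out
  else
    let head := vs.take 100
    pvRenderChunks (vs.drop 100)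
      (out ++ pvJoinStrs head ++ (if head.length == 100 then "\n" else ""))
termination_by vs.length
decreasing_by
  rename_i hne
  simp only [List.isEmpty_iff] at hne
  have : 0 < vs.length := List.length_pos_iff.mpr hne
  simp only [List.length_drop]
  omega

def display_galaxy_alt (galaxy_map : List (String × Int)) : String :=
  pvRenderChunks (PySem.Dict.ofList galaxy_map).values ""

-- ===== PRECONDITION & SPEC =====
def Spec_display_galaxy (galaxy_map : List (String × Int)) (out : String) : Prop := out = display_galaxy_alt galaxy_map
instance (galaxy_map : List (String × Int)) (out : String) : Decidable (Spec_display_galaxy galaxy_map out) := by unfold Spec_display_galaxy; infer_instance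

-- ===== CLAIM (what is proved, stated in full; the proofs are below) =====
def Claim_equal_display_galaxy : Prop := ∀ (galaxy_map : List (String × Int)), Dom_display_galaxy galaxy_map → Spec_display_galaxy galaxy_map (display_galaxy galaxy_map)

-- ===== LEMMAS AND PROOFS =====

theorem pvRenderChunks_nil (out : String) : pvRenderChunks [] out = out := by
  rw [pvRenderChunks]; simp

theorem pvRenderChunks_ne (vs : List Int) (hne : vs ≠ []) (out : String) :
    pvRenderChunks vs out = pvRenderChunks (vs.drop 100)
      (out ++ pvJoinStrs (vs.take 100) ++ (if (vs.take 100).length == 100 then "\n" else "")) := by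
  conv_lhs => rw [pvRenderChunks]
  rw [if_neg (by simpa [List.isEmpty_iff] using hne)]

-- A's loop over fewer than a whole chunk (counter never reaches the next multiple of 100):
-- pure concatenation, no newline.
theorem pvLoopA_partial (h : List Int) : ∀ (c : Int) (acc : String),
    0 ≤ c → c % 100 + h.length < 100 →
    pvLoopA h c acc = acc ++ pvJoinStrs h := by
  induction h with
  | nil => intro c acc _ _; simp [pvLoopA, pvJoinStrs]
  | cons v rest ih =>
    intro c acc hc hlt
    have hmod : PySem.Int.mod (c + 1) MAP_SIZE = (c + 1) % 100 := by
      simp [MAP_SIZE]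
    simp only [List.length_cons] at hlt
    have hcond : ¬ (MAP_SIZE ≤ c + 1 ∧ PySem.Int.mod (c + 1) MAP_SIZE = 0) := by
      rintro ⟨-, h0⟩
      rw [hmod] at h0
      omega
    rw [pvLoopA, if_neg hcond, ih (c + 1) _ (by omega) (by omega)]
    simp [pvJoinStrs, String.append_assoc]

-- A's loop over one full chunk h followed by t: it emits the chunk then "\n" and continues
-- with the counter advanced by h.length (stated with the within-chunk invariant
-- c % 100 = 100 - h.length so it can recurse element by element).
theorem pvLoopA_full (h : List Int) : ∀ (t : List Int) (c : Int) (acc : String),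
    0 ≤ c → 0 < h.length → h.length ≤ 100 → c % 100 = 100 - h.length →
    pvLoopA (h ++ t) c acc = pvLoopA t (c + h.length) (acc ++ pvJoinStrs h ++ "\n") := by
  induction h with
  | nil => intro t c acc _ h0 _ _; simp at h0
  | cons v rest ih =>
    intro t c acc hc _ hle hmodc
    have hmod : PySem.Int.mod (c + 1) MAP_SIZE = (c + 1) % 100 := by
      simp [MAP_SIZE]
    simp only [List.length_cons] at hle hmodc ⊢
    rcases rest with _ | ⟨w, rest'⟩
    · -- last element of the chunk: the counter hits the multiple of 100, newline appended
      have hc99 : c % 100 = 99 := by simp at hmodc; omega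
      have hcond : MAP_SIZE ≤ c + 1 ∧ PySem.Int.mod (c + 1) MAP_SIZE = 0 := by
        refine ⟨by simp [MAP_SIZE]; omega, by rw [hmod]; omega⟩
      simp only [List.cons_append, List.nil_append, pvLoopA, if_pos hcond]
      simp [pvJoinStrs, String.append_assoc, String.append_empty]
    · -- not yet at the boundary: no newline, recurse with the invariant shifted by one
      have hcond : ¬ (MAP_SIZE ≤ c + 1 ∧ PySem.Int.mod (c + 1) MAP_SIZE = 0) := by
        rintro ⟨-, h0⟩
        rw [hmod] at h0
        simp at hmodc
        omega
      rw [List.cons_append, pvLoopA, if_neg hcond]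
      rw [ih t (c + 1) _ (by omega) (by simp)
        (by simp at hle; omega)
        (by simp at hmodc ⊢; omega)]
      simp only [pvJoinStrs, String.append_assoc, List.length_cons]
      congr 1
      push_cast
      ring

-- main invariant: at any multiple-of-100 counter, A's remaining loop equals B's chunk loop.
theorem pvLoopA_eq_chunks (n : Nat) : ∀ (vs : List Int), vs.length ≤ n → ∀ (c : Int) (acc : String),
    0 ≤ c → c % 100 = 0 →
    pvLoopA vs c acc = pvRenderChunks vs acc := by
  induction n with
  | zero =>
    intro vs hlen c acc _ _
    have hvs : vs = [] := List.length_eq_zero_iff.mp (by omega)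
    subst hvs
    rw [pvRenderChunks_nil]
    simp [pvLoopA]
  | succ n ih =>
    intro vs hlen c acc hc hmod
    by_cases hne : vs = []
    · subst hne; rw [pvRenderChunks_nil]; simp [pvLoopA]
    · have hpos : 0 < vs.length := List.length_pos_iff.mpr hne
      rw [pvRenderChunks_ne vs hne acc]
      by_cases hbig : 100 ≤ vs.length
      · -- a full chunk of 100, then the rest
        have htake : (vs.take 100).length = 100 := by simp [List.length_take]; omega
        rw [htake]
        simp only [beq_self_eq_true, if_pos]
        have hsplit : vs = vs.take 100 ++ vs.drop 100 := (List.take_append_drop 100 vs).symm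
        calc pvLoopA vs c acc
            = pvLoopA (vs.take 100 ++ vs.drop 100) c acc := by rw [← hsplit]
          _ = pvLoopA (vs.drop 100) (c + (vs.take 100).length)
                (acc ++ pvJoinStrs (vs.take 100) ++ "\n") := by
              exact pvLoopA_full _ _ _ _ hc (by omega) (by omega) (by rw [htake]; omega)
          _ = pvRenderChunks (vs.drop 100) (acc ++ pvJoinStrs (vs.take 100) ++ "\n") := by
              rw [htake]
              refine ih _ (by simp [List.length_drop]; omega) _ _ (by omega) (by omega)
      · -- the (shorter) final chunk: no newline, and the chunk loop ends right after
        have htake : vs.take 100 = vs := List.take_of_length_le (by omega)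
        have hlenne : (vs.length == 100) = false := by simp; omega
        have hdrop : vs.drop 100 = ([] : List Int) := List.drop_eq_nil_of_le (by omega)
        rw [htake, hlenne, hdrop, pvRenderChunks_nil,
          pvLoopA_partial vs c acc hc (by omega)]
        simp [String.append_empty]
-- ===== VERDICT (by name: the statement is the Claim_ definition above) =====
theorem display_galaxy_spec : Claim_equal_display_galaxy := by
  intro galaxy_map _
  unfold Spec_display_galaxy display_galaxy display_galaxy_alt
  exact pvLoopA_eq_chunks _ _ le_rfl 0 "" le_rfl rfl
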